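-- pv_equiv track=rewrite | github.com/twistedmove/61a-sp14-website | slides/lect13.py | collapse_runs
-- ===== SOURCE A (Python) =====
-- def collapse_runs(L):
--     """Remove the second and subsequent consecutive duplicates of
--     values in L, modifying and returning L.
--     >>> x = [1, 2, 1, 1, 1, 2, 0, 0]
--     >>> collapse_runs(x)
--     [1, 2, 1, 2, 0]
--     >>> x
--     [1, 2, 1, 2, 0]"""
--     n = 1
--     while n < len(L):
--         if L[n] == L[n-1]:
--             L[n-1:n] = []   # or del L[n-1]
--         else:
--             n += 1
--     return L
-- ===== SOURCE B (Python) =====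
-- def collapse_runs(L):
--     result = L[:1] + [x for prev, x in zip(L, L[1:]) if x != prev]
--     L[:] = result
--     return L
-- ===== Notes on version B (the rewrite author's own statement) =====
-- stated objective: alternative
-- what changed: Replaces the quadratic-worst-case in-place deletion loop (each del shifts the tail) by one pass over adjacent pairs via zip in a list comprehension, keeping each element that differs from its predecessor, then L[:] = result.
import Mathlib
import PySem

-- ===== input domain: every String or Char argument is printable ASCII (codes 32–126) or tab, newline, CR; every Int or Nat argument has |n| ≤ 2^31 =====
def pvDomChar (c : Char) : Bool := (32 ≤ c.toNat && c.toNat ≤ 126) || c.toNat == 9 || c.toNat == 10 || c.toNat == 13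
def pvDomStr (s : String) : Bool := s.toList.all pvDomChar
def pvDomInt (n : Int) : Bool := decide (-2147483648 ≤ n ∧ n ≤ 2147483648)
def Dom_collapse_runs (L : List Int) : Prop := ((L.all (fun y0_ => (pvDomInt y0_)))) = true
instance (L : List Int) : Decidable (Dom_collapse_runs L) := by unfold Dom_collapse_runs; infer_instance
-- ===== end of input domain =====

-- ===== PORT A =====
-- A mutates L in place; the equivalence proved here is about the return value
-- (B performs the same net mutation via L[:] = result in Python).
-- while n < len(L): if L[n] == L[n-1]: del L[n-1] else: n += 1
-- fuel is only a totality guard: each iteration decreases len(L) - n by one,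
-- so fuel = len(L) is always enough.
def collapseRunsLoop : Nat → List Int → Nat → List Int
  | 0, L, _ => L
  | fuel+1, L, n =>
    if n < L.length then
      if L.getD n 0 = L.getD (n-1) 0 then
        collapseRunsLoop fuel (L.eraseIdx (n-1)) n
      else
        collapseRunsLoop fuel L (n+1)
    else L

def collapse_runs (L : List Int) : List Int :=
  collapseRunsLoop L.length L 1

-- ===== PORT B =====
-- result = L[:1] + [x for prev, x in zip(L, L[1:]) if x != prev]; L[:] = result; return L
def collapse_runs_alt (L : List Int) : List Int :=
  L.take 1 ++ ((L.zip (L.drop 1)).filterMap fun px => if px.2 ≠ px.1 then some px.2 else none)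


-- ===== PRECONDITION & SPEC =====
def Spec_collapse_runs (L : List Int) (out : List Int) : Prop := out = collapse_runs_alt L
instance (L : List Int) (out : List Int) : Decidable (Spec_collapse_runs L out) := by unfold Spec_collapse_runs; infer_instance

-- ===== CLAIM (what is proved, stated in full; the proofs are below) =====
def Claim_equal_collapse_runs : Prop := ∀ (L : List Int), Dom_collapse_runs L → Spec_collapse_runs L (collapse_runs L)

-- ===== LEMMAS AND PROOFS =====
-- canonical run-collapse used to characterise both ports
def coll (p : Int) : List Int → List Int
  | [] => []
  | x :: t => if x = p then coll p t else x :: coll x t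

lemma getD_append_len {Q : List Int} {p : Int} {t : List Int} :
    (Q ++ p :: t).getD Q.length 0 = p := by
  induction Q with
  | nil => rfl
  | cons q Q ih => simpa using ih

lemma eraseIdx_append_len {Q : List Int} {p : Int} {t : List Int} :
    (Q ++ p :: t).eraseIdx Q.length = Q ++ t := by
  induction Q with
  | nil => rfl
  | cons q Q ih => simpa using ih

lemma aLoop_eq (rest : List Int) : ∀ (fuel : Nat), rest.length ≤ fuel →
    ∀ (Q : List Int) (p : Int),
    collapseRunsLoop fuel (Q ++ p :: rest) (Q.length + 1) = Q ++ p :: coll p rest := by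
  induction rest with
  | nil =>
    intro fuel _ Q p
    cases fuel with
    | zero => simp [collapseRunsLoop, coll]
    | succ f => simp [collapseRunsLoop, coll]
  | cons x rest ih =>
    intro fuel hf Q p
    cases fuel with
    | zero => simp at hf
    | succ f =>
      have hf' : rest.length ≤ f := by simpa using hf
      have h1 : (Q ++ p :: x :: rest).getD (Q.length + 1) 0 = x := by
        have := @getD_append_len (Q ++ [p]) x rest
        simpa using this
      have h2 : (Q ++ p :: x :: rest).getD (Q.length + 1 - 1) 0 = p := by
        simpa using (@getD_append_len Q p (x :: rest))
      have hlen : Q.length + 1 < (Q ++ p :: x :: rest).length := by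
        simp
      rw [collapseRunsLoop, if_pos hlen, h1, h2]
      by_cases hpx : x = p
      · rw [if_pos hpx]
        have he : (Q ++ p :: x :: rest).eraseIdx (Q.length + 1 - 1) = Q ++ x :: rest := by
          subst hpx
          simpa using (@eraseIdx_append_len Q x (x :: rest))
        rw [he, ih f hf' Q x, hpx]
        simp [coll]
      · rw [if_neg hpx]
        have := ih f hf' (Q ++ [p]) x
        simp only [List.length_append, List.length_cons, List.length_nil,
          List.append_assoc, List.cons_append, List.nil_append] at this
        rw [show Q.length + 1 + 1 = Q.length + (0 + 1) + 1 by omega] at this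
        rw [this]
        simp [coll, hpx]

lemma bzip_eq (t : List Int) : ∀ (p : Int),
    (((p :: t).zip t).filterMap fun px => if px.2 ≠ px.1 then some px.2 else none)
      = coll p t := by
  induction t with
  | nil => intro p; rfl
  | cons x t ih =>
    intro p
    rw [List.zip_cons_cons]
    by_cases hpx : x = p
    · have hf : (fun px : Int × Int => if px.2 ≠ px.1 then some px.2 else none) (p, x)
          = none := by simp [hpx]
      simp only [List.filterMap_cons, hf]
      rw [ih x, hpx]
      simp [coll]
    · have hf : (fun px : Int × Int => if px.2 ≠ px.1 then some px.2 else none) (p, x)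
          = some x := by simp [hpx]
      simp only [List.filterMap_cons, hf]
      rw [ih x]
      simp [coll, hpx]

-- ===== VERDICT (by name: the statement is the Claim_ definition above) =====
theorem collapse_runs_spec : Claim_equal_collapse_runs := by
  intro L _
  unfold Spec_collapse_runs collapse_runs collapse_runs_alt
  cases L with
  | nil => rfl
  | cons a t =>
    have hA := aLoop_eq t (a :: t).length (by simp) [] a
    simp only [List.nil_append, List.length_nil] at hA
    rw [hA]
    simp only [List.take_succ_cons, List.take_zero, List.drop_succ_cons, List.drop_zero]
    rw [bzip_eq t a]
    simp
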